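-- pv_equiv track=rewrite | github.com/ugur0sahin/PathwayTPR | src/identifierSample.py | filterMutations
-- ===== SOURCE A (Python) =====
-- def filterMutations(MutationProfile,isDeleterious,isCOSMIChotspot,isTCGAhotspot):
--
--     nested_Mutations = list(MutationProfile.keys())
--
--     if isDeleterious:
--         isDeleterious_genes = list()
--         for gene, mutations in MutationProfile.items():
--             if mutations["isDeleterious"]:
--                 isDeleterious_genes.append(gene)
--         nested_Mutations = set(isDeleterious_genes).intersection(set(nested_Mutations))
--
--
--     if isCOSMIChotspot:
--         isCOSMIChotspot_genes = list()
--         for gene, mutations in MutationProfile.items():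
--             if mutations["isCOSMIChotspot"]:
--                 isCOSMIChotspot_genes.append(gene)
--
--         nested_Mutations = set(isCOSMIChotspot_genes).intersection(set(nested_Mutations))
--
--
--     if isTCGAhotspot:
--         isTCGAhotspot_genes = list()
--         for gene, mutations in MutationProfile.items():
--             if mutations["isTCGAhotspot"]:
--                 isTCGAhotspot_genes.append(gene)
--
--         nested_Mutations = set(isTCGAhotspot_genes).intersection(set(nested_Mutations))
--
--
--     return nested_Mutations
-- ===== SOURCE B (Python) =====
-- def filterMutations(MutationProfile, isDeleterious, isCOSMIChotspot, isTCGAhotspot):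
--     active = [key for key, flag in (("isDeleterious", isDeleterious),
--                                     ("isCOSMIChotspot", isCOSMIChotspot),
--                                     ("isTCGAhotspot", isTCGAhotspot)) if flag]
--     if not active:
--         return list(MutationProfile.keys())
--     return {gene for gene, mutations in MutationProfile.items()
--             if all(mutations[key] for key in active)}
-- ===== Notes on version B (the rewrite author's own statement) =====
-- stated objective: simpler
-- what changed: B computes the list of active flag keys once and makes a single pass over MutationProfile.items(), keeping a gene iff every active flag's entry is true, instead of A's up-to-three separate scan-and-append passes each followed by building two sets and intersecting them (B keeps A's return-type split: the key list when no flag is active, a set otherwise).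
import Mathlib
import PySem

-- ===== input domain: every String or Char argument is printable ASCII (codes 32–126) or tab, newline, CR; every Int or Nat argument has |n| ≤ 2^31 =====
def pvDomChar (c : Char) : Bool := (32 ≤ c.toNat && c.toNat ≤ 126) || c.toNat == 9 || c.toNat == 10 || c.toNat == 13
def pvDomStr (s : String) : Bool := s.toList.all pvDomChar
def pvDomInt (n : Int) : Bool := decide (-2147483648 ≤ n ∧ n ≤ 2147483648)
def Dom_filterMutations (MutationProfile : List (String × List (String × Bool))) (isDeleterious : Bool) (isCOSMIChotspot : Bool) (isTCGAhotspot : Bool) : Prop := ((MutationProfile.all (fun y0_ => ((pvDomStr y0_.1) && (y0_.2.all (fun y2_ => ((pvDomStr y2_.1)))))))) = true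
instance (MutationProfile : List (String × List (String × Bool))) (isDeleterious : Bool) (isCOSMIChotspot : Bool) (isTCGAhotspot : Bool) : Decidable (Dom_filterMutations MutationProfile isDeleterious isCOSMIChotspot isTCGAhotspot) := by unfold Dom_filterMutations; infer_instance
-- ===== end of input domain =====

-- B replaces A's three separate filter-then-set-intersect passes by one pass over the items
-- that keeps a gene iff every active flag's condition holds (same return value on Pre_).

-- ===== PORT A =====
-- mutations["k"]: dict lookup = first match in the association list; total form, Pre_ guarantees the key is present
def pvLookupA (mutations : List (String × Bool)) (k : String) : Bool :=
  (List.lookup k mutations).getD false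

-- the 'for gene, mutations in MutationProfile.items(): if mutations[k]: genes.append(gene)' loop
def pvFlagLoopA (MutationProfile : List (String × List (String × Bool))) (k : String) : List String :=
  MutationProfile.foldl (fun acc p => if pvLookupA p.2 k then acc ++ [p.1] else acc) []

def filterMutations (MutationProfile : List (String × List (String × Bool))) (isDeleterious : Bool) (isCOSMIChotspot : Bool) (isTCGAhotspot : Bool) : List String :=
  let nested0 := MutationProfile.map Prod.fst
  let nested1 := if isDeleterious then
      PySem.Set.inter (PySem.Set.ofList (pvFlagLoopA MutationProfile "isDeleterious")) (PySem.Set.ofList nested0)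
    else nested0
  let nested2 := if isCOSMIChotspot then
      PySem.Set.inter (PySem.Set.ofList (pvFlagLoopA MutationProfile "isCOSMIChotspot")) (PySem.Set.ofList nested1)
    else nested1
  let nested3 := if isTCGAhotspot then
      PySem.Set.inter (PySem.Set.ofList (pvFlagLoopA MutationProfile "isTCGAhotspot")) (PySem.Set.ofList nested2)
    else nested2
  nested3

-- ===== PORT B =====
-- the list comprehension over the three (key, flag) pairs
def pvActiveB (isDeleterious : Bool) (isCOSMIChotspot : Bool) (isTCGAhotspot : Bool) : List String :=
  [("isDeleterious", isDeleterious), ("isCOSMIChotspot", isCOSMIChotspot), ("isTCGAhotspot", isTCGAhotspot)].foldl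
    (fun acc kf => if kf.2 then acc ++ [kf.1] else acc) []

def filterMutations_alt (MutationProfile : List (String × List (String × Bool))) (isDeleterious : Bool) (isCOSMIChotspot : Bool) (isTCGAhotspot : Bool) : List String :=
  let active := pvActiveB isDeleterious isCOSMIChotspot isTCGAhotspot
  if active.isEmpty then MutationProfile.map Prod.fst
  else
    -- the set comprehension, built in items order
    PySem.Set.ofList (MutationProfile.foldl
      (fun acc p => if active.all (fun k => (List.lookup k p.2).getD false) then acc ++ [p.1] else acc) [])

-- ===== PRECONDITION & SPEC =====
-- Pre_ excludes (i) association lists with duplicate outer gene keys (they do not arise from a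
-- Python dict, which this argument is) and (ii) inputs where a gene's inner dict lacks the key of
-- an active flag, on which A (and B) raise KeyError.
def Pre_filterMutations (MutationProfile : List (String × List (String × Bool))) (isDeleterious : Bool) (isCOSMIChotspot : Bool) (isTCGAhotspot : Bool) : Prop :=
  (MutationProfile.map Prod.fst).Nodup ∧
  ∀ p ∈ MutationProfile,
    (isDeleterious = true → "isDeleterious" ∈ p.2.map Prod.fst) ∧
    (isCOSMIChotspot = true → "isCOSMIChotspot" ∈ p.2.map Prod.fst) ∧
    (isTCGAhotspot = true → "isTCGAhotspot" ∈ p.2.map Prod.fst)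
instance (MutationProfile : List (String × List (String × Bool))) (isDeleterious : Bool) (isCOSMIChotspot : Bool) (isTCGAhotspot : Bool) : Decidable (Pre_filterMutations MutationProfile isDeleterious isCOSMIChotspot isTCGAhotspot) := by unfold Pre_filterMutations; infer_instance

def pvWitness_filterMutations : (List (String × List (String × Bool))) × Bool × Bool × Bool :=
  ([("KRAS", [("isDeleterious", true), ("isCOSMIChotspot", false), ("isTCGAhotspot", true)]),
    ("TP53", [("isDeleterious", false), ("isCOSMIChotspot", true), ("isTCGAhotspot", true)])],
   true, false, true)

def Spec_filterMutations (MutationProfile : List (String × List (String × Bool))) (isDeleterious : Bool) (isCOSMIChotspot : Bool) (isTCGAhotspot : Bool) (out : List String) : Prop := out = filterMutations_alt MutationProfile isDeleterious isCOSMIChotspot isTCGAhotspot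
instance (MutationProfile : List (String × List (String × Bool))) (isDeleterious : Bool) (isCOSMIChotspot : Bool) (isTCGAhotspot : Bool) (out : List String) : Decidable (Spec_filterMutations MutationProfile isDeleterious isCOSMIChotspot isTCGAhotspot out) := by unfold Spec_filterMutations; infer_instance

-- ===== CLAIM (what is proved, stated in full; the proofs are below) =====
def Claim_equal_filterMutations : Prop := ∀ (MutationProfile : List (String × List (String × Bool))) (isDeleterious : Bool) (isCOSMIChotspot : Bool) (isTCGAhotspot : Bool), Dom_filterMutations MutationProfile isDeleterious isCOSMIChotspot isTCGAhotspot → Pre_filterMutations MutationProfile isDeleterious isCOSMIChotspot isTCGAhotspot → Spec_filterMutations MutationProfile isDeleterious isCOSMIChotspot isTCGAhotspot (filterMutations MutationProfile isDeleterious isCOSMIChotspot isTCGAhotspot)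

-- ===== LEMMAS AND PROOFS =====

-- A's append loop is map-fst-of-filter
theorem pvFlagLoopA_eq_filter (MP : List (String × List (String × Bool))) (k : String) :
    pvFlagLoopA MP k = (MP.filter (fun p => pvLookupA p.2 k)).map Prod.fst := by
  simpa [pvFlagLoopA] using PySem.List.foldl_append_if (fun p => pvLookupA p.2 k) Prod.fst MP []

-- with nodup gene keys, membership of p.1 in the mapped filter is the predicate at p
theorem pv_mem_map_fst_filter {MP : List (String × List (String × Bool))}
    (hn : (MP.map Prod.fst).Nodup) (q : String × List (String × Bool) → Bool)
    {p : String × List (String × Bool)} (hp : p ∈ MP) :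
    (p.1 ∈ (MP.filter q).map Prod.fst) ↔ q p = true := by
  constructor
  · rintro h
    rcases List.mem_map.mp h with ⟨p', hp', he⟩
    rcases List.mem_filter.mp hp' with ⟨hp'm, hq⟩
    have := List.inj_on_of_nodup_map hn hp'm hp he
    subst this; exact hq
  · intro hq
    exact List.mem_map.mpr ⟨p, List.mem_filter.mpr ⟨hp, hq⟩, rfl⟩

theorem pv_nodup_map_fst_filter {MP : List (String × List (String × Bool))}
    (hn : (MP.map Prod.fst).Nodup) (q : String × List (String × Bool) → Bool) :
    ((MP.filter q).map Prod.fst).Nodup := by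
  have : (MP.filter q).map Prod.fst |>.Sublist (MP.map Prod.fst) :=
    (List.filter_sublist (l := MP)).map Prod.fst
  exact hn.sublist this

-- one A-stage: intersecting a fresh flag pass with the accumulated filtered key list conjoins the predicates
theorem pv_stage {MP : List (String × List (String × Bool))}
    (hn : (MP.map Prod.fst).Nodup) (f g : String × List (String × Bool) → Bool) :
    PySem.Set.inter (PySem.Set.ofList ((MP.filter f).map Prod.fst))
        (PySem.Set.ofList ((MP.filter g).map Prod.fst))
      = (MP.filter (fun p => f p && g p)).map Prod.fst := by
  rw [PySem.Set.ofList_eq_self_of_nodup _ (pv_nodup_map_fst_filter hn f),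
      PySem.Set.ofList_eq_self_of_nodup _ (pv_nodup_map_fst_filter hn g)]
  show List.filter _ ((MP.filter f).map Prod.fst) = _
  rw [List.filter_map, List.filter_filter]
  congr 1
  apply List.filter_congr
  intro p hpm
  have hceq : PySem.Set.contains ((MP.filter g).map Prod.fst) p.1 = g p := by
    by_cases h : g p = true
    · rw [h]
      exact (PySem.Set.contains_iff _ _).mpr ((pv_mem_map_fst_filter hn g hpm).mpr h)
    · have h' : g p = false := by simpa using h
      rw [h']
      exact Bool.eq_false_iff.mpr (fun hc => by
        simp [(pv_mem_map_fst_filter hn g hpm).mp ((PySem.Set.contains_iff _ _).mp hc)] at h')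
  show (PySem.Set.contains ((MP.filter g).map Prod.fst) p.1 && f p) = (f p && g p)
  rw [hceq, Bool.and_comm]

-- B's comprehension loop is map-fst-of-filter too
theorem pvB_loop_eq (MP : List (String × List (String × Bool))) (ks : List String) :
    MP.foldl (fun acc p => if ks.all (fun k => (List.lookup k p.2).getD false) then acc ++ [p.1] else acc) []
      = (MP.filter (fun p => ks.all (fun k => pvLookupA p.2 k))).map Prod.fst := by
  simpa [pvLookupA] using
    PySem.List.foldl_append_if (fun p : String × List (String × Bool) => ks.all (fun k => pvLookupA p.2 k)) Prod.fst MP []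

theorem pv_ofList_self {MP : List (String × List (String × Bool))}
    (hn : (MP.map Prod.fst).Nodup) (q : String × List (String × Bool) → Bool) :
    PySem.Set.ofList ((MP.filter q).map Prod.fst) = (MP.filter q).map Prod.fst :=
  PySem.Set.ofList_eq_self_of_nodup _ (pv_nodup_map_fst_filter hn q)

-- ===== VERDICT (by name: the statement is the Claim_ definition above) =====
theorem filterMutations_spec : Claim_equal_filterMutations := by
  intro MP d c t _ hpre
  obtain ⟨hn, -⟩ := hpre
  unfold Spec_filterMutations
  have hkeys : MP.map Prod.fst = (MP.filter (fun _ => true)).map Prod.fst := by simp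
  cases d <;> cases c <;> cases t
  case false.false.false => rfl
  all_goals
    simp only [filterMutations, filterMutations_alt, pvActiveB, List.foldl_cons, List.foldl_nil,
      if_true, if_false, Bool.false_eq_true, List.nil_append, List.cons_append]
    rw [hkeys]
    repeat rw [pvFlagLoopA_eq_filter]
    repeat rw [pv_stage hn]
    rw [pvB_loop_eq, pv_ofList_self hn]
    simp only [List.isEmpty_cons, Bool.false_eq_true, if_false, List.all_cons, List.all_nil]
    try
      congr 1
      apply List.filter_congr
      intro p _
      cases hd : pvLookupA p.2 "isDeleterious" <;> cases hc : pvLookupA p.2 "isCOSMIChotspot" <;>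
        cases ht : pvLookupA p.2 "isTCGAhotspot" <;> simp [pvLookupA] at hd hc ht ⊢
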